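-- pv_equiv track=rewrite | github.com/annasba07/ai-papers-agent | backend/app/services/providers/pwc_provider.py | _infer_method_type
-- ===== SOURCE A (Python) =====
-- from typing import Sequence, List, Dict, Any, Optional
--
-- def _infer_method_type(name: str) -> Optional[str]:
--     """Infer method type from name"""
--     name_lower = name.lower()
--
--     if any(kw in name_lower for kw in ["transformer", "attention", "bert", "gpt"]):
--         return "transformer"
--     elif any(kw in name_lower for kw in ["diffusion", "score", "ddpm"]):
--         return "diffusion"
--     elif any(kw in name_lower for kw in ["cnn", "convolution", "resnet", "vgg"]):
--         return "convolutional"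
--     elif any(kw in name_lower for kw in ["rnn", "lstm", "gru", "recurrent"]):
--         return "recurrent"
--     elif any(kw in name_lower for kw in ["gan", "generative adversarial"]):
--         return "generative"
--     elif any(kw in name_lower for kw in ["reinforcement", "rl", "policy", "q-learning"]):
--         return "reinforcement_learning"
--     elif any(kw in name_lower for kw in ["contrastive", "clip", "simclr"]):
--         return "contrastive"
--
--     return None
-- ===== SOURCE B (Python) =====
-- from typing import Optional
--
-- # Flat keyword -> (priority, method_type) hash index, priority = position of the
-- # branch in the original decision chain.
-- _KEYWORD_INFO = {}
-- for _prio, (_cat, _kws) in enumerate([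
--     ("transformer", ("transformer", "attention", "bert", "gpt")),
--     ("diffusion", ("diffusion", "score", "ddpm")),
--     ("convolutional", ("cnn", "convolution", "resnet", "vgg")),
--     ("recurrent", ("rnn", "lstm", "gru", "recurrent")),
--     ("generative", ("gan", "generative adversarial")),
--     ("reinforcement_learning", ("reinforcement", "rl", "policy", "q-learning")),
--     ("contrastive", ("contrastive", "clip", "simclr")),
-- ]):
--     for _kw in _kws:
--         _KEYWORD_INFO[_kw] = (_prio, _cat)
--
-- _LENGTHS = sorted({len(_kw) for _kw in _KEYWORD_INFO})
--
--
-- def _infer_method_type(name: str) -> Optional[str]: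
--     """Infer method type from name.
--
--     Single sweep over the string: at every start position, probe each possible
--     keyword length and look the substring up in the hash index, keeping the
--     best (lowest-priority) hit.  A slice that runs past the end of the string
--     is merely shorter; it either misses the index or repeats an exact hit, so
--     no bounds check is needed.
--     """
--     name_lower = name.lower()
--     best = None
--     for i in range(len(name_lower)):
--         for length in _LENGTHS:
--             info = _KEYWORD_INFO.get(name_lower[i:i + length])
--             if info is not None and (best is None or info[0] < best[0]):
--                 best = info
--     return best[1] if best is not None else None
-- ===== Notes on version B (the rewrite author's own statement) =====
-- stated objective: alternative
-- what changed: Replaces the seven sequential keyword-containment scans of the lowered name with a single sweep over it that hash-looks-up every substring of a keyword length in a flat keyword-to-(priority, category) index and keeps the minimum-priority hit.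
import Mathlib
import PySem

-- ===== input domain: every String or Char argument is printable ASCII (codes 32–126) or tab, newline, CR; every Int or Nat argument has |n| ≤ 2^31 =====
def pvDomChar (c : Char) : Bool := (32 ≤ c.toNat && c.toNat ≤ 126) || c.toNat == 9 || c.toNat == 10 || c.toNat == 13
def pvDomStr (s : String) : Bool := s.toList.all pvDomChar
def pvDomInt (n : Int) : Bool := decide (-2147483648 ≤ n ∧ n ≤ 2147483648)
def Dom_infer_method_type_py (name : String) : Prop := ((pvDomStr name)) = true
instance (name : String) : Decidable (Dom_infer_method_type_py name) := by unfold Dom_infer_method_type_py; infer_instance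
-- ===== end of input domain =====

-- B replaces A's seven sequential keyword-containment scans by one sweep over the string that
-- hash-looks-up every substring of a keyword length in a flat keyword->(priority,category)
-- index, keeping the minimum-priority hit (alternative algorithm; same behaviour).


-- ===== PORT A =====
def infer_method_type_py (name : String) : Option String :=
  let name_lower := PySem.Str.lower name
  if ["transformer", "attention", "bert", "gpt"].any (fun kw => PySem.Str.isIn kw name_lower) then
    some "transformer"
  else if ["diffusion", "score", "ddpm"].any (fun kw => PySem.Str.isIn kw name_lower) then
    some "diffusion"
  else if ["cnn", "convolution", "resnet", "vgg"].any (fun kw => PySem.Str.isIn kw name_lower) then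
    some "convolutional"
  else if ["rnn", "lstm", "gru", "recurrent"].any (fun kw => PySem.Str.isIn kw name_lower) then
    some "recurrent"
  else if ["gan", "generative adversarial"].any (fun kw => PySem.Str.isIn kw name_lower) then
    some "generative"
  else if ["reinforcement", "rl", "policy", "q-learning"].any (fun kw => PySem.Str.isIn kw name_lower) then
    some "reinforcement_learning"
  else if ["contrastive", "clip", "simclr"].any (fun kw => PySem.Str.isIn kw name_lower) then
    some "contrastive"
  else
    none

-- ===== PORT B =====
-- B's module-level flat hash index keyword -> (priority, method_type); strings are ported to the
-- exact List Char side (String.toList), on which PySem defines the string primitives.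
def kwInfo : PySem.Dict (List Char) (Int × String) :=
  PySem.Dict.ofList
    [ ("transformer".toList, (0, "transformer")),
      ("attention".toList,   (0, "transformer")),
      ("bert".toList,        (0, "transformer")),
      ("gpt".toList,         (0, "transformer")),
      ("diffusion".toList,   (1, "diffusion")),
      ("score".toList,       (1, "diffusion")),
      ("ddpm".toList,        (1, "diffusion")),
      ("cnn".toList,         (2, "convolutional")),
      ("convolution".toList, (2, "convolutional")),
      ("resnet".toList,      (2, "convolutional")),
      ("vgg".toList,         (2, "convolutional")),
      ("rnn".toList,         (3, "recurrent")),
      ("lstm".toList,        (3, "recurrent")),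
      ("gru".toList,         (3, "recurrent")),
      ("recurrent".toList,   (3, "recurrent")),
      ("gan".toList,         (4, "generative")),
      ("generative adversarial".toList, (4, "generative")),
      ("reinforcement".toList, (5, "reinforcement_learning")),
      ("rl".toList,          (5, "reinforcement_learning")),
      ("policy".toList,      (5, "reinforcement_learning")),
      ("q-learning".toList,  (5, "reinforcement_learning")),
      ("contrastive".toList, (6, "contrastive")),
      ("clip".toList,        (6, "contrastive")),
      ("simclr".toList,      (6, "contrastive")) ]

-- B's _LENGTHS = sorted({len(kw) for kw in _KEYWORD_INFO})
def kwLengths : List Nat :=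
  PySem.List.sorted (PySem.Set.ofList (kwInfo.keys.map List.length)) (fun x => x) false

-- B: one sweep over the lowered string; at each start position probe each keyword length,
-- hash-lookup the slice and keep the lowest-priority hit.
def infer_method_type_py_alt (name : String) : Option String :=
  let name_lower := (PySem.Str.lower name).toList
  let best :=
    (List.range name_lower.length).foldl
      (fun best (i : Nat) =>
        kwLengths.foldl
          (fun best (length : Nat) =>
            match kwInfo.get? (PySem.List.slice name_lower (some (i : Int)) (some ((i : Int) + (length : Int)))) with
            | none => best
            | some info =>
              match best with
              | none => some info
              | some b => if info.1 < b.1 then some info else some b)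
          best)
      none
  match best with
  | none => none
  | some b => some b.2

-- ===== PRECONDITION & SPEC =====
def Spec_infer_method_type_py (name : String) (out : Option String) : Prop := out = infer_method_type_py_alt name
instance (name : String) (out : Option String) : Decidable (Spec_infer_method_type_py name out) := by unfold Spec_infer_method_type_py; infer_instance

-- ===== CLAIM (what is proved, stated in full; the proofs are below) =====
def Claim_equal_infer_method_type_py : Prop := ∀ (name : String), Dom_infer_method_type_py name → Spec_infer_method_type_py name (infer_method_type_py name)

-- ===== LEMMAS AND PROOFS =====

-- the comparison step of B's accumulator, on a found info
def pvStep (best : Option (Int × String)) (info : Int × String) : Option (Int × String) :=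
  match best with
  | none => some info
  | some b => if info.1 < b.1 then some info else some b

-- all (priority, category) hits collected by B's sweep over s
def pvCollected (s : List Char) : List (Int × String) :=
  (List.range s.length).flatMap
    (fun i => kwLengths.filterMap (fun L => kwInfo.get? ((s.drop i).take L)))

-- category of each priority
def pvCat (p : Int) : String :=
  if p = 0 then "transformer" else if p = 1 then "diffusion" else if p = 2 then "convolutional"
  else if p = 3 then "recurrent" else if p = 4 then "generative"
  else if p = 5 then "reinforcement_learning" else "contrastive"

-- "some keyword of priority p occurs in s"
def pvHit (p : Int) (s : List Char) : Prop :=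
  ∃ kw ∈ kwInfo.keys, kwInfo.get? kw = some (p, pvCat p) ∧ kw <:+: s

theorem kwInfo_nodup : kwInfo.keys.Nodup := by decide

-- concrete facts about the dictionary
theorem kwInfo_wf : ∀ k v, kwInfo.get? k = some v →
    0 ≤ v.1 ∧ v.1 ≤ 6 ∧ v.2 = pvCat v.1 ∧ k ≠ [] ∧ k.length ∈ kwLengths := by
  intro k v h
  have hm := PySem.Dict.mem_items_of_get?_eq_some kwInfo h
  have hit : kwInfo.items = [ ("transformer".toList, ((0:Int), "transformer")),
      ("attention".toList,   (0, "transformer")),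
      ("bert".toList,        (0, "transformer")),
      ("gpt".toList,         (0, "transformer")),
      ("diffusion".toList,   (1, "diffusion")),
      ("score".toList,       (1, "diffusion")),
      ("ddpm".toList,        (1, "diffusion")),
      ("cnn".toList,         (2, "convolutional")),
      ("convolution".toList, (2, "convolutional")),
      ("resnet".toList,      (2, "convolutional")),
      ("vgg".toList,         (2, "convolutional")),
      ("rnn".toList,         (3, "recurrent")),
      ("lstm".toList,        (3, "recurrent")),
      ("gru".toList,         (3, "recurrent")),
      ("recurrent".toList,   (3, "recurrent")),
      ("gan".toList,         (4, "generative")),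
      ("generative adversarial".toList, (4, "generative")),
      ("reinforcement".toList, (5, "reinforcement_learning")),
      ("rl".toList,          (5, "reinforcement_learning")),
      ("policy".toList,      (5, "reinforcement_learning")),
      ("q-learning".toList,  (5, "reinforcement_learning")),
      ("contrastive".toList, (6, "contrastive")),
      ("clip".toList,        (6, "contrastive")),
      ("simclr".toList,      (6, "contrastive")) ] := by decide
  rw [hit] at hm
  simp only [List.mem_cons, List.not_mem_nil, or_false] at hm
  rcases hm with h|h|h|h|h|h|h|h|h|h|h|h|h|h|h|h|h|h|h|h|h|h|h|h <;>
    (rw [Prod.ext_iff] at h; obtain ⟨hk, hv⟩ := h; subst hk; subst hv; decide)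

-- fold of pvStep over a filterMap-with-match loop body
theorem foldl_match_filterMap {α : Type} (f : α → Option (Int × String)) (l : List α)
    (b : Option (Int × String)) :
    l.foldl (fun acc x => match f x with | none => acc | some y => pvStep acc y) b =
      (l.filterMap f).foldl pvStep b := by
  induction l generalizing b with
  | nil => rfl
  | cons x t ih => cases hf : f x <;> simp [hf, ih]

-- B computes pvStep folded over the collected hits
theorem alt_eq_fold (name : String) :
    infer_method_type_py_alt name =
      (((pvCollected ((PySem.Str.lower name).toList)).foldl pvStep none).map Prod.snd) := by
  have body : ∀ (b : Option (Int × String)) (i : Nat),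
      kwLengths.foldl
        (fun best (length : Nat) =>
          match kwInfo.get? (PySem.List.slice ((PySem.Str.lower name).toList) (some (i : Int)) (some ((i : Int) + (length : Int)))) with
          | none => best
          | some info =>
            match best with
            | none => some info
            | some b => if info.1 < b.1 then some info else some b) b =
      (kwLengths.filterMap (fun L => kwInfo.get? ((((PySem.Str.lower name).toList).drop i).take L))).foldl pvStep b := by
    intro b i
    rw [← foldl_match_filterMap]
    apply PySem.List.foldl_congr_mem
    intro acc L _
    rw [PySem.List.slice_natCast_add]
    cases kwInfo.get? ((((PySem.Str.lower name).toList).drop i).take L) <;> rfl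
  unfold infer_method_type_py_alt pvCollected
  dsimp only
  rw [List.foldl_flatMap]
  have houter := PySem.List.foldl_congr_mem (List.range ((PySem.Str.lower name).toList).length)
    _ _ (none : Option (Int × String)) (fun acc i _ => body acc i)
  rw [houter]
  cases ((List.range ((PySem.Str.lower name).toList).length).foldl
      (fun b i => (kwLengths.filterMap (fun L => kwInfo.get? ((((PySem.Str.lower name).toList).drop i).take L))).foldl pvStep b)
      (none : Option (Int × String))) <;> rfl

-- priority view of the accumulator
def pvK (o : Option (Int × String)) : Int := o.elim 7 Prod.fst

theorem foldl_pvStep_spec (l : List (Int × String))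
    (hl : ∀ x ∈ l, 0 ≤ x.1 ∧ x.1 ≤ 6 ∧ x.2 = pvCat x.1) (b : Option (Int × String))
    (hb : pvK b ≤ 7 ∧ (∀ p c, b = some (p, c) → 0 ≤ p ∧ p ≤ 6 ∧ c = pvCat p)) :
    pvK (l.foldl pvStep b) = l.foldl (fun a x => min a x.1) (pvK b) ∧
    (∀ p c, l.foldl pvStep b = some (p, c) → 0 ≤ p ∧ p ≤ 6 ∧ c = pvCat p) := by
  induction l generalizing b with
  | nil => exact ⟨rfl, hb.2⟩
  | cons x t ih =>
    obtain ⟨hx0, hx6, hxc⟩ := hl x (by simp)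
    have hstep : pvK (pvStep b x) = min (pvK b) x.1 ∧
        (∀ p c, pvStep b x = some (p, c) → 0 ≤ p ∧ p ≤ 6 ∧ c = pvCat p) := by
      cases b with
      | none =>
        refine ⟨by simp [pvStep, pvK]; omega, ?_⟩
        intro p c h
        have hx : x = (p, c) := by simpa [pvStep] using h
        subst hx
        exact ⟨hx0, hx6, hxc⟩
      | some bb =>
        obtain ⟨hb0, hb6, hbc⟩ := hb.2 bb.1 bb.2 rfl
        by_cases hlt : x.1 < bb.1
        · refine ⟨by simp [pvStep, hlt, pvK]; omega, ?_⟩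
          intro p c h
          have hx : x = (p, c) := by simpa [pvStep, hlt] using h
          subst hx
          exact ⟨hx0, hx6, hxc⟩
        · refine ⟨by simp [pvStep, hlt, pvK]; omega, ?_⟩
          intro p c h
          have hx : bb = (p, c) := by simpa [pvStep, hlt] using h
          subst hx
          exact ⟨hb0, hb6, hbc⟩
    have hb7 := hb.1
    have := ih (fun y hy => hl y (by simp [hy])) (pvStep b x)
      ⟨by rw [hstep.1]; omega, hstep.2⟩
    refine ⟨?_, this.2⟩
    rw [List.foldl_cons, List.foldl_cons, this.1, hstep.1]

-- the running min over the collected priorities: bounds and attainment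
theorem foldl_min_le (l : List (Int × String)) (a : Int) :
    l.foldl (fun acc x => min acc x.1) a ≤ a ∧
    (∀ x ∈ l, l.foldl (fun acc x => min acc x.1) a ≤ x.1) ∧
    (l.foldl (fun acc x => min acc x.1) a = a ∨
      ∃ x ∈ l, l.foldl (fun acc x => min acc x.1) a = x.1) := by
  induction l generalizing a with
  | nil => exact ⟨le_refl _, by simp, Or.inl rfl⟩
  | cons x t ih =>
    obtain ⟨h1, h2, h3⟩ := ih (min a x.1)
    refine ⟨le_trans h1 (by omega), ?_, ?_⟩
    · intro y hy
      rcases List.mem_cons.mp hy with h | h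
      · subst h; exact le_trans h1 (by omega)
      · exact h2 y h
    · rcases h3 with h | ⟨y, hy, h⟩
      · rcases le_or_gt a x.1 with hle | hgt
        · left; rw [List.foldl_cons, h]; omega
        · right; exact ⟨x, by simp, by rw [List.foldl_cons, h]; omega⟩
      · right; exact ⟨y, by simp [hy], h⟩

-- membership in the collected list = a keyword occurrence
theorem mem_collected (s : List Char) (x : Int × String) :
    x ∈ pvCollected s ↔ ∃ kw, kwInfo.get? kw = some x ∧ kw <:+: s := by
  unfold pvCollected
  simp only [List.mem_flatMap, List.mem_filterMap, List.mem_range]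
  constructor
  · rintro ⟨i, hi, L, _, hget⟩
    refine ⟨(s.drop i).take L, hget, ?_⟩
    exact (List.take_prefix L (s.drop i)).isInfix.trans (List.drop_suffix i s).isInfix
  · rintro ⟨kw, hget, hinf⟩
    obtain ⟨u, t, hut⟩ := hinf
    obtain ⟨_, _, _, hne, hlen⟩ := kwInfo_wf kw x hget
    refine ⟨u.length, ?_, kw.length, hlen, ?_⟩
    · subst hut; rw [List.length_append, List.length_append]
      cases kw with
      | nil => exact absurd rfl hne
      | cons c cs => simp; omega
    · have hdrop : s.drop u.length = kw ++ t := by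
        subst hut; rw [List.append_assoc, List.drop_left]
      rw [hdrop, List.take_left]
      exact hget

theorem get?_mem_keys (kw : List Char) (v : Int × String) (h : kwInfo.get? kw = some v) :
    kw ∈ kwInfo.keys :=
  PySem.Dict.mem_keys_of_mem_items kwInfo (PySem.Dict.mem_items_of_get?_eq_some kwInfo h)

-- a hit of priority p is in the collected list
theorem hit_mem_collected (s : List Char) (p : Int) (h : pvHit p s) :
    (p, pvCat p) ∈ pvCollected s := by
  obtain ⟨kw, _, hget, hinf⟩ := h
  exact (mem_collected s _).mpr ⟨kw, hget, hinf⟩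

theorem collected_hit (s : List Char) (x : Int × String) (h : x ∈ pvCollected s) :
    x = (x.1, pvCat x.1) ∧ pvHit x.1 s := by
  obtain ⟨kw, hget, hinf⟩ := (mem_collected s x).mp h
  obtain ⟨_, _, hc, _, _⟩ := kwInfo_wf kw x hget
  have hx : x = (x.1, pvCat x.1) := by rw [Prod.ext_iff]; exact ⟨rfl, hc⟩
  exact ⟨hx, kw, get?_mem_keys kw x hget, by rw [← hx]; exact hget, hinf⟩

-- the fold over the collected hits, summarised: its minimum priority m bounds every hit,
-- and the result is the category of m (none when there is no hit, i.e. m = 7)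
theorem fold_facts (s : List Char) :
    ∃ m : Int, 0 ≤ m ∧ m ≤ 7 ∧
      (∀ p : Int, pvHit p s → m ≤ p) ∧
      (m ≤ 6 → ((pvCollected s).foldl pvStep none).map Prod.snd = some (pvCat m) ∧ pvHit m s) ∧
      (m = 7 → ((pvCollected s).foldl pvStep none).map Prod.snd = none) := by
  have hwf : ∀ x ∈ pvCollected s, 0 ≤ x.1 ∧ x.1 ≤ 6 ∧ x.2 = pvCat x.1 := by
    intro x hx
    obtain ⟨kw, hget, _⟩ := (mem_collected s x).mp hx
    obtain ⟨h0, h6, hc, _, _⟩ := kwInfo_wf kw x hget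
    exact ⟨h0, h6, hc⟩
  obtain ⟨hK, hWF⟩ := foldl_pvStep_spec (pvCollected s) hwf none
    ⟨by norm_num [pvK], by intro p c h; cases h⟩
  obtain ⟨hle7, hmin, hatt⟩ := foldl_min_le (pvCollected s) 7
  set r := (pvCollected s).foldl pvStep none with hr
  set m := (pvCollected s).foldl (fun a x => min a x.1) 7 with hm
  have hKr : pvK r = m := by rw [hK]; rfl
  have hge : 0 ≤ m := by
    rcases hatt with h | ⟨x, hx, h⟩
    · omega
    · have := (hwf x hx).1; omega
  refine ⟨m, hge, hle7, ?_, ?_, ?_⟩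
  · intro p hp
    exact hmin _ (hit_mem_collected s p hp)
  · intro h6
    have hm7 : m ≠ 7 := by omega
    obtain ⟨x, hx, hxm⟩ := hatt.resolve_left hm7
    obtain ⟨hxeq, hxhit⟩ := collected_hit s x hx
    cases hrr : r with
    | none => rw [hrr] at hKr; simp [pvK] at hKr; omega
    | some bc =>
      obtain ⟨_, _, hcc⟩ := hWF bc.1 bc.2 (by rw [← hrr])
      have hpm : bc.1 = m := by rw [hrr] at hKr; simpa [pvK] using hKr
      constructor
      · simp [hcc, hpm]
      · rw [hxm]; exact hxhit
  · intro h7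
    cases hrr : r with
    | none => rfl
    | some bc =>
      obtain ⟨_, h6, _⟩ := hWF bc.1 bc.2 (by rw [← hrr])
      rw [hrr] at hKr; simp [pvK] at hKr; omega

-- A's branch condition for priority p reads off the keys mapping to (p, pvCat p)
theorem pvHit_iff_kws (p : Int) (s : List Char) (kws : List (List Char))
    (hkws : (kwInfo.items.filter (fun x => x.2 == (p, pvCat p))).map Prod.fst = kws) :
    pvHit p s ↔ ∃ kw ∈ kws, kw <:+: s := by
  constructor
  · rintro ⟨kw, _, hget, hinf⟩
    refine ⟨kw, ?_, hinf⟩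
    rw [← hkws]
    exact List.mem_map.mpr ⟨(kw, (p, pvCat p)),
      List.mem_filter.mpr ⟨PySem.Dict.mem_items_of_get?_eq_some kwInfo hget, by simp⟩, rfl⟩
  · rintro ⟨kw, hmem, hinf⟩
    rw [← hkws] at hmem
    obtain ⟨x, hxf, hx1⟩ := List.mem_map.mp hmem
    obtain ⟨hxi, hxv⟩ := List.mem_filter.mp hxf
    have hxv' : x.2 = (p, pvCat p) := by simpa using hxv
    have hxx : x = (kw, (p, pvCat p)) := by
      rw [Prod.ext_iff]; exact ⟨hx1, hxv'⟩
    rw [hxx] at hxi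
    have hget : kwInfo.get? kw = some (p, pvCat p) :=
      (PySem.Dict.get?_eq_some_iff_mem_items kwInfo kw _ kwInfo_nodup).mpr hxi
    exact ⟨kw, get?_mem_keys kw _ hget, hget, hinf⟩

-- A's branch 0 tests exactly a hit of priority 0
theorem pvBranch0 (name : String) :
    ((["transformer", "attention", "bert", "gpt"] : List String).any
      (fun kw => PySem.Str.isIn kw (PySem.Str.lower name)) = true) ↔
      pvHit 0 ((PySem.Str.lower name).toList) := by
  rw [pvHit_iff_kws 0 _ ["transformer".toList, "attention".toList, "bert".toList, "gpt".toList] (by decide)]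
  simp only [List.any_eq_true, PySem.Str.isIn_iff_infix]
  constructor
  · rintro ⟨kw, hmem, hinf⟩
    fin_cases hmem
    exacts [⟨"transformer".toList, by simp, hinf⟩, ⟨"attention".toList, by simp, hinf⟩, ⟨"bert".toList, by simp, hinf⟩, ⟨"gpt".toList, by simp, hinf⟩]
  · rintro ⟨kw, hmem, hinf⟩
    fin_cases hmem
    exacts [⟨"transformer", by simp, hinf⟩, ⟨"attention", by simp, hinf⟩, ⟨"bert", by simp, hinf⟩, ⟨"gpt", by simp, hinf⟩]

-- A's branch 1 tests exactly a hit of priority 1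
theorem pvBranch1 (name : String) :
    ((["diffusion", "score", "ddpm"] : List String).any
      (fun kw => PySem.Str.isIn kw (PySem.Str.lower name)) = true) ↔
      pvHit 1 ((PySem.Str.lower name).toList) := by
  rw [pvHit_iff_kws 1 _ ["diffusion".toList, "score".toList, "ddpm".toList] (by decide)]
  simp only [List.any_eq_true, PySem.Str.isIn_iff_infix]
  constructor
  · rintro ⟨kw, hmem, hinf⟩
    fin_cases hmem
    exacts [⟨"diffusion".toList, by simp, hinf⟩, ⟨"score".toList, by simp, hinf⟩, ⟨"ddpm".toList, by simp, hinf⟩]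
  · rintro ⟨kw, hmem, hinf⟩
    fin_cases hmem
    exacts [⟨"diffusion", by simp, hinf⟩, ⟨"score", by simp, hinf⟩, ⟨"ddpm", by simp, hinf⟩]

-- A's branch 2 tests exactly a hit of priority 2
theorem pvBranch2 (name : String) :
    ((["cnn", "convolution", "resnet", "vgg"] : List String).any
      (fun kw => PySem.Str.isIn kw (PySem.Str.lower name)) = true) ↔
      pvHit 2 ((PySem.Str.lower name).toList) := by
  rw [pvHit_iff_kws 2 _ ["cnn".toList, "convolution".toList, "resnet".toList, "vgg".toList] (by decide)]
  simp only [List.any_eq_true, PySem.Str.isIn_iff_infix]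
  constructor
  · rintro ⟨kw, hmem, hinf⟩
    fin_cases hmem
    exacts [⟨"cnn".toList, by simp, hinf⟩, ⟨"convolution".toList, by simp, hinf⟩, ⟨"resnet".toList, by simp, hinf⟩, ⟨"vgg".toList, by simp, hinf⟩]
  · rintro ⟨kw, hmem, hinf⟩
    fin_cases hmem
    exacts [⟨"cnn", by simp, hinf⟩, ⟨"convolution", by simp, hinf⟩, ⟨"resnet", by simp, hinf⟩, ⟨"vgg", by simp, hinf⟩]

-- A's branch 3 tests exactly a hit of priority 3
theorem pvBranch3 (name : String) :
    ((["rnn", "lstm", "gru", "recurrent"] : List String).any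
      (fun kw => PySem.Str.isIn kw (PySem.Str.lower name)) = true) ↔
      pvHit 3 ((PySem.Str.lower name).toList) := by
  rw [pvHit_iff_kws 3 _ ["rnn".toList, "lstm".toList, "gru".toList, "recurrent".toList] (by decide)]
  simp only [List.any_eq_true, PySem.Str.isIn_iff_infix]
  constructor
  · rintro ⟨kw, hmem, hinf⟩
    fin_cases hmem
    exacts [⟨"rnn".toList, by simp, hinf⟩, ⟨"lstm".toList, by simp, hinf⟩, ⟨"gru".toList, by simp, hinf⟩, ⟨"recurrent".toList, by simp, hinf⟩]
  · rintro ⟨kw, hmem, hinf⟩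
    fin_cases hmem
    exacts [⟨"rnn", by simp, hinf⟩, ⟨"lstm", by simp, hinf⟩, ⟨"gru", by simp, hinf⟩, ⟨"recurrent", by simp, hinf⟩]

-- A's branch 4 tests exactly a hit of priority 4
theorem pvBranch4 (name : String) :
    ((["gan", "generative adversarial"] : List String).any
      (fun kw => PySem.Str.isIn kw (PySem.Str.lower name)) = true) ↔
      pvHit 4 ((PySem.Str.lower name).toList) := by
  rw [pvHit_iff_kws 4 _ ["gan".toList, "generative adversarial".toList] (by decide)]
  simp only [List.any_eq_true, PySem.Str.isIn_iff_infix]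
  constructor
  · rintro ⟨kw, hmem, hinf⟩
    fin_cases hmem
    exacts [⟨"gan".toList, by simp, hinf⟩, ⟨"generative adversarial".toList, by simp, hinf⟩]
  · rintro ⟨kw, hmem, hinf⟩
    fin_cases hmem
    exacts [⟨"gan", by simp, hinf⟩, ⟨"generative adversarial", by simp, hinf⟩]

-- A's branch 5 tests exactly a hit of priority 5
theorem pvBranch5 (name : String) :
    ((["reinforcement", "rl", "policy", "q-learning"] : List String).any
      (fun kw => PySem.Str.isIn kw (PySem.Str.lower name)) = true) ↔
      pvHit 5 ((PySem.Str.lower name).toList) := by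
  rw [pvHit_iff_kws 5 _ ["reinforcement".toList, "rl".toList, "policy".toList, "q-learning".toList] (by decide)]
  simp only [List.any_eq_true, PySem.Str.isIn_iff_infix]
  constructor
  · rintro ⟨kw, hmem, hinf⟩
    fin_cases hmem
    exacts [⟨"reinforcement".toList, by simp, hinf⟩, ⟨"rl".toList, by simp, hinf⟩, ⟨"policy".toList, by simp, hinf⟩, ⟨"q-learning".toList, by simp, hinf⟩]
  · rintro ⟨kw, hmem, hinf⟩
    fin_cases hmem
    exacts [⟨"reinforcement", by simp, hinf⟩, ⟨"rl", by simp, hinf⟩, ⟨"policy", by simp, hinf⟩, ⟨"q-learning", by simp, hinf⟩]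

-- A's branch 6 tests exactly a hit of priority 6
theorem pvBranch6 (name : String) :
    ((["contrastive", "clip", "simclr"] : List String).any
      (fun kw => PySem.Str.isIn kw (PySem.Str.lower name)) = true) ↔
      pvHit 6 ((PySem.Str.lower name).toList) := by
  rw [pvHit_iff_kws 6 _ ["contrastive".toList, "clip".toList, "simclr".toList] (by decide)]
  simp only [List.any_eq_true, PySem.Str.isIn_iff_infix]
  constructor
  · rintro ⟨kw, hmem, hinf⟩
    fin_cases hmem
    exacts [⟨"contrastive".toList, by simp, hinf⟩, ⟨"clip".toList, by simp, hinf⟩, ⟨"simclr".toList, by simp, hinf⟩]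
  · rintro ⟨kw, hmem, hinf⟩
    fin_cases hmem
    exacts [⟨"contrastive", by simp, hinf⟩, ⟨"clip", by simp, hinf⟩, ⟨"simclr", by simp, hinf⟩]

-- ===== VERDICT (by name: the statement is the Claim_ definition above) =====
theorem infer_method_type_py_spec : Claim_equal_infer_method_type_py := by
  intro name _
  unfold Spec_infer_method_type_py
  rw [alt_eq_fold]
  obtain ⟨m, hge, hle7, F1, F2, F3⟩ := fold_facts ((PySem.Str.lower name).toList)
  unfold infer_method_type_py
  dsimp only
  by_cases h0 : pvHit 0 ((PySem.Str.lower name).toList)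
  · rw [if_pos ((pvBranch0 name).mpr h0)]
    have hmp : m = 0 := by
      have hle := F1 0 h0
      omega
    rw [(F2 (by omega)).1, hmp]
    rfl
  · rw [if_neg (fun hc => h0 ((pvBranch0 name).mp hc))]
    by_cases h1 : pvHit 1 ((PySem.Str.lower name).toList)
    · rw [if_pos ((pvBranch1 name).mpr h1)]
      have hmp : m = 1 := by
        have hle := F1 1 h1
        have hhit := (F2 (by omega)).2
        interval_cases m
        · exact absurd hhit h0
        · rfl
      rw [(F2 (by omega)).1, hmp]
      rfl
    · rw [if_neg (fun hc => h1 ((pvBranch1 name).mp hc))]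
      by_cases h2 : pvHit 2 ((PySem.Str.lower name).toList)
      · rw [if_pos ((pvBranch2 name).mpr h2)]
        have hmp : m = 2 := by
          have hle := F1 2 h2
          have hhit := (F2 (by omega)).2
          interval_cases m
          · exact absurd hhit h0
          · exact absurd hhit h1
          · rfl
        rw [(F2 (by omega)).1, hmp]
        rfl
      · rw [if_neg (fun hc => h2 ((pvBranch2 name).mp hc))]
        by_cases h3 : pvHit 3 ((PySem.Str.lower name).toList)
        · rw [if_pos ((pvBranch3 name).mpr h3)]
          have hmp : m = 3 := by
            have hle := F1 3 h3
            have hhit := (F2 (by omega)).2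
            interval_cases m
            · exact absurd hhit h0
            · exact absurd hhit h1
            · exact absurd hhit h2
            · rfl
          rw [(F2 (by omega)).1, hmp]
          rfl
        · rw [if_neg (fun hc => h3 ((pvBranch3 name).mp hc))]
          by_cases h4 : pvHit 4 ((PySem.Str.lower name).toList)
          · rw [if_pos ((pvBranch4 name).mpr h4)]
            have hmp : m = 4 := by
              have hle := F1 4 h4
              have hhit := (F2 (by omega)).2
              interval_cases m
              · exact absurd hhit h0
              · exact absurd hhit h1
              · exact absurd hhit h2
              · exact absurd hhit h3
              · rfl
            rw [(F2 (by omega)).1, hmp]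
            rfl
          · rw [if_neg (fun hc => h4 ((pvBranch4 name).mp hc))]
            by_cases h5 : pvHit 5 ((PySem.Str.lower name).toList)
            · rw [if_pos ((pvBranch5 name).mpr h5)]
              have hmp : m = 5 := by
                have hle := F1 5 h5
                have hhit := (F2 (by omega)).2
                interval_cases m
                · exact absurd hhit h0
                · exact absurd hhit h1
                · exact absurd hhit h2
                · exact absurd hhit h3
                · exact absurd hhit h4
                · rfl
              rw [(F2 (by omega)).1, hmp]
              rfl
            · rw [if_neg (fun hc => h5 ((pvBranch5 name).mp hc))]
              by_cases h6 : pvHit 6 ((PySem.Str.lower name).toList)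
              · rw [if_pos ((pvBranch6 name).mpr h6)]
                have hmp : m = 6 := by
                  have hle := F1 6 h6
                  have hhit := (F2 (by omega)).2
                  interval_cases m
                  · exact absurd hhit h0
                  · exact absurd hhit h1
                  · exact absurd hhit h2
                  · exact absurd hhit h3
                  · exact absurd hhit h4
                  · exact absurd hhit h5
                  · rfl
                rw [(F2 (by omega)).1, hmp]
                rfl
              · rw [if_neg (fun hc => h6 ((pvBranch6 name).mp hc))]
                have hm7 : m = 7 := by
                  by_contra hne
                  have hhit := (F2 (by omega)).2
                  interval_cases m
                  · exact absurd hhit h0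
                  · exact absurd hhit h1
                  · exact absurd hhit h2
                  · exact absurd hhit h3
                  · exact absurd hhit h4
                  · exact absurd hhit h5
                  · exact absurd hhit h6
                  · exact hne rfl
                rw [F3 hm7]
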